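-- pv_equiv track=rewrite | github.com/yanisadel/Google-Kick-Start | 2022/Round A/Challenge Nine/challenge_nine.py | fct
-- ===== SOURCE A (Python) =====
-- def fct(N):
--     sum = 0
--     to_str = str(N)
--     length = len(to_str)
--     for letter in to_str:
--         sum += int(letter)
--
--     sum %= 9
--     nb_to_add = 9 - sum
--
--     i = 0
--     while i < length:
--         if nb_to_add >= int(to_str[i]):
--             i += 1
--         else:
--             break
--
--     res = to_str[0:i] + str(nb_to_add) + to_str[i:]
--     res = int(res)
--
--     return res
-- ===== SOURCE B (Python) =====
-- def fct(N):
--     s = str(N)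
--     total = 0
--     for letter in s:
--         total += int(letter)
--     d = 9 - total % 9
--     c = str(d)
--     # all candidates have the same length, so the smallest string is the smallest number
--     best = min(s[:i] + c + s[i:] for i in range(len(s) + 1))
--     return int(best)
-- ===== Notes on version B (the rewrite author's own statement) =====
-- stated objective: alternative
-- what changed: A locates the insertion index with a greedy left-to-right scan and splices once; B generates all len+1 candidate insertion strings and returns the minimum (equal-length strings, so string order is numeric order), converting to int once.
import Mathlib
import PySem

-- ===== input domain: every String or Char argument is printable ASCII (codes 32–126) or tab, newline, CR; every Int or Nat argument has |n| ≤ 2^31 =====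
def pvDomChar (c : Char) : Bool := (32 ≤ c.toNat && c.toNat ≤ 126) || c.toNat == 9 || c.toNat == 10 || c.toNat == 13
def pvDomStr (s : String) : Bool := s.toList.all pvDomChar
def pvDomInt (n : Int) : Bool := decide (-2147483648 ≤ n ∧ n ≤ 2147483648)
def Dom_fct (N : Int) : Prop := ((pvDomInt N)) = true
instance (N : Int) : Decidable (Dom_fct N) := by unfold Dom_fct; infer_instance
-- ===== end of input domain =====

-- B replaces A's greedy insertion-position scan by taking the minimum over all candidate insertion
-- strings (same length, so string order is numeric order); objective: alternative, same cost class.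

-- ===== PORT A =====
-- A's 'while i < length' loop: advance while nb_to_add >= int(to_str[i]), else break.
-- to_str[i] is PySem.List.pyGet?; int(<one-char string>) is PySem.Int.ofChars?; the '.getD 0'
-- defaults are unreachable under Pre_fct (i stays in range and every character is a digit).
def fctLoop (to_str : List Char) (length : Nat) (nb_to_add : Int) (i : Nat) : Nat :=
  if i < length then
    if nb_to_add ≥ ((PySem.List.pyGet? to_str (i : Int)).bind
        (fun ch => PySem.Int.ofChars? [ch])).getD 0 then
      fctLoop to_str length nb_to_add (i + 1)
    else i
  else i
  termination_by length - i

def fct (N : Int) : Int :=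
  let to_str := PySem.Int.toChars N                      -- str(N)
  let length := to_str.length
  let sum := to_str.foldl (fun acc letter => acc + (PySem.Int.ofChars? [letter]).getD 0) 0
  let sum := PySem.Int.mod sum 9
  let nb_to_add := 9 - sum
  let i := fctLoop to_str length nb_to_add 0
  let res := PySem.List.slice to_str (some 0) (some (i : Int))
      ++ PySem.Int.toChars nb_to_add ++ PySem.List.slice to_str (some (i : Int)) none
  (PySem.Int.ofChars? res).getD 0                        -- int(res); getD unreachable under Pre_fct

-- ===== PORT B =====
def fct_alt (N : Int) : Int :=
  let s := PySem.Int.toChars N                           -- str(N)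
  let total := s.foldl (fun acc letter => acc + (PySem.Int.ofChars? [letter]).getD 0) 0
  let d := 9 - PySem.Int.mod total 9
  let c := PySem.Int.toChars d                           -- str(d)
  let cands := (PySem.List.pyRange 0 (s.length + 1)).map
    (fun i => PySem.List.slice s none (some i) ++ c ++ PySem.List.slice s (some i) none)
  let best := (PySem.List.min? cands id).getD []         -- min of the strings (Python's str '<')
  (PySem.Int.ofChars? best).getD 0                       -- int(best); getD unreachable under Pre_fct

-- ===== PRECONDITION & SPEC =====
-- Pre_fct: 0 ≤ N. On N < 0 the Python A raises ValueError (int('-') on the sign character).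
def Pre_fct (N : Int) : Prop := 0 ≤ N
instance (N : Int) : Decidable (Pre_fct N) := by unfold Pre_fct; infer_instance
def pvWitness_fct : Int := (31)

def Spec_fct (N : Int) (out : Int) : Prop := out = fct_alt N
instance (N : Int) (out : Int) : Decidable (Spec_fct N out) := by unfold Spec_fct; infer_instance

-- ===== CLAIM (what is proved, stated in full; the proofs are below) =====
def Claim_equal_fct : Prop := ∀ (N : Int), Dom_fct N → Pre_fct N → Spec_fct N (fct N)

-- ===== LEMMAS AND PROOFS =====

-- the numeric value of a digit character
def dval (c : Char) : Int := (c.toNat : Int) - 48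

lemma digit_toNat_bounds {c : Char} (h : c.isDigit) : 48 ≤ c.toNat ∧ c.toNat ≤ 57 := by
  simp [Char.isDigit] at h
  exact ⟨h.1, h.2⟩

lemma digit_cases {c : Char} (h : c.isDigit) :
    c = '0' ∨ c = '1' ∨ c = '2' ∨ c = '3' ∨ c = '4' ∨ c = '5' ∨ c = '6' ∨ c = '7' ∨
      c = '8' ∨ c = '9' := by
  obtain ⟨h1, h2⟩ := digit_toNat_bounds h
  have e : c = Char.ofNat c.toNat := (Char.ofNat_toNat c).symm
  interval_cases hh : c.toNat <;> rw [e] <;> decide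

lemma ofChars?_digit {c : Char} (h : c.isDigit) : PySem.Int.ofChars? [c] = some (dval c) := by
  rcases digit_cases h with h|h|h|h|h|h|h|h|h|h <;> subst h <;> decide

lemma digit_lt_iff {c₁ c₂ : Char} (h₁ : c₁.isDigit) (h₂ : c₂.isDigit) :
    c₁ < c₂ ↔ dval c₁ < dval c₂ := by
  obtain ⟨a1, a2⟩ := digit_toNat_bounds h₁
  obtain ⟨b1, b2⟩ := digit_toNat_bounds h₂
  rw [Char.lt_def, UInt32.lt_iff_toNat_lt]
  unfold dval Char.toNat at *
  omega

lemma digit_le_iff {c₁ c₂ : Char} (h₁ : c₁.isDigit) (h₂ : c₂.isDigit) :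
    c₁ ≤ c₂ ↔ dval c₁ ≤ dval c₂ := by
  obtain ⟨a1, a2⟩ := digit_toNat_bounds h₁
  obtain ⟨b1, b2⟩ := digit_toNat_bounds h₂
  rw [Char.le_def, UInt32.le_iff_toNat_le]
  unfold dval Char.toNat at *
  omega

lemma digitChar_digit {k : Nat} (h : k < 10) : (Nat.digitChar k).isDigit = true := by
  interval_cases k <;> decide

lemma digitChar_dval {k : Nat} (h : k < 10) : dval (Nat.digitChar k) = (k : Int) := by
  interval_cases k <;> decide

lemma toChars_digits {N : Int} (h : 0 ≤ N) : ∀ c ∈ PySem.Int.toChars N, c.isDigit := by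
  intro c hc
  unfold PySem.Int.toChars at hc
  rw [if_neg (by omega)] at hc
  exact Nat.isDigit_of_mem_toDigits (by norm_num) (by norm_num) hc

lemma toChars_single {d : Int} (h1 : 1 ≤ d) (h2 : d ≤ 9) :
    PySem.Int.toChars d = [Nat.digitChar d.toNat] := by
  unfold PySem.Int.toChars
  rw [if_neg (by omega)]
  exact Nat.toDigits_of_lt_base (by omega)

lemma loop_le (s : List Char) (nb : Int) (k : Nat) (h : k ≤ s.length) :
    fctLoop s s.length nb k ≤ s.length := by
  by_cases h' : k < s.length
  · rw [fctLoop, if_pos h']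
    split
    · exact loop_le s nb (k + 1) h'
    · omega
  · rw [fctLoop, if_neg h']; omega
  termination_by s.length - k

lemma loop_cond (s : List Char) (j : Nat) (hj : j < s.length) :
    ((PySem.List.pyGet? s (j : Int)).bind (fun ch => PySem.Int.ofChars? [ch])).getD 0
      = (PySem.Int.ofChars? [s[j]]).getD 0 := by
  have : PySem.List.pyGet? s (j : Int) = some s[j] := by
    simp [PySem.List.pyGet?_natCast, List.getElem?_eq_getElem hj]
  rw [this]
  rfl

lemma loop_mid (s : List Char) (nb : Int) (k : Nat) :
    ∀ j (hj : j < s.length), k ≤ j → j < fctLoop s s.length nb k →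
      (PySem.Int.ofChars? [s[j]]).getD 0 ≤ nb := by
  intro j hj hk hlt
  by_cases h : k < s.length
  · rw [fctLoop, if_pos h] at hlt
    split at hlt
    · rename_i hcond
      rcases Nat.eq_or_lt_of_le hk with rfl | hk'
      · rw [loop_cond s k hj] at hcond; exact hcond
      · exact loop_mid s nb (k + 1) j hj hk' hlt
    · omega
  · rw [fctLoop, if_neg h] at hlt; omega
  termination_by s.length - k

lemma loop_stop (s : List Char) (nb : Int) (k : Nat) (h : fctLoop s s.length nb k < s.length) :
    nb < ((s[fctLoop s s.length nb k]?).bind (fun c => PySem.Int.ofChars? [c])).getD 0 := by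
  by_cases h' : k < s.length
  · rw [fctLoop, if_pos h'] at h ⊢
    by_cases hcond : nb ≥ ((PySem.List.pyGet? s (k : Int)).bind
        (fun ch => PySem.Int.ofChars? [ch])).getD 0
    · rw [if_pos hcond] at h ⊢
      exact loop_stop s nb (k + 1) h
    · rw [if_neg hcond] at h ⊢
      rw [loop_cond s k h'] at hcond
      rw [List.getElem?_eq_getElem h']
      simpa using hcond
  · rw [fctLoop, if_neg h'] at h
    omega
  termination_by s.length - k

-- the insertion of the character dc at position j of s
def ins (s : List Char) (dc : Char) (j : Nat) : List Char := s.take j ++ dc :: s.drop j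

lemma ins_zero (s : List Char) (dc : Char) : ins s dc 0 = dc :: s := by
  simp [ins]

lemma ins_succ (c : Char) (t : List Char) (dc : Char) (k : Nat) :
    ins (c :: t) dc (k + 1) = c :: ins t dc k := by
  simp [ins]

-- the greedy insertion point gives the lexicographically smallest insertion string
lemma ins_min (s : List Char) (dc : Char) (i : Nat)
    (hle : i ≤ s.length)
    (hmid : ∀ k (hk : k < s.length), k < i → s[k] ≤ dc)
    (hstop : ∀ h : i < s.length, dc < s[i]) :
    ∀ j, j ≤ s.length → ins s dc i ≤ ins s dc j := by
  induction s generalizing i with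
  | nil =>
    intro j hj
    simp at hle hj
    subst hle; subst hj
    exact le_refl _
  | cons c t ih =>
    intro j hj
    match i, j with
    | 0, 0 => exact le_refl _
    | 0, j + 1 =>
      rw [ins_zero, ins_succ]
      have hcd : dc < c := hstop (by simp)
      exact le_of_lt (by rw [List.cons_lt_cons_iff]; exact Or.inl hcd)
    | i + 1, j =>
      have hc : c ≤ dc := by
        have := hmid 0 (by simp) (by omega)
        simpa using this
      have ihx : ∀ j', j' ≤ t.length → ins t dc i ≤ ins t dc j' := by
        apply ih i
        · simpa using hle
        · intro k hk hki
          have := hmid (k + 1) (by simpa using hk) (by omega)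
          simpa using this
        · intro h
          have := hstop (by simpa using h)
          simpa using this
      match j with
      | j + 1 =>
        rw [ins_succ, ins_succ]
        exact List.cons_le_cons c (ihx j (by simpa using hj))
      | 0 =>
        rw [ins_succ, ins_zero]
        rcases lt_or_eq_of_le hc with hlt | heq
        · exact le_of_lt (by rw [List.cons_lt_cons_iff]; exact Or.inl hlt)
        · have h2 : dc :: c :: t = c :: ins t dc 0 := by rw [ins_zero, heq]
          rw [h2]
          exact List.cons_le_cons c (ihx 0 (by simp))

lemma min?_inst_eq (xs : List (List Char)) :
    @PySem.List.min? (List Char) (List Char) List.instLT (fun a b => a.decidableLT b) xs id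
      = @PySem.List.min? (List Char) (List Char) List.instLinearOrder.toPreorder.toLT
          (@LinearOrder.toDecidableLT _ List.instLinearOrder) xs id := by
  rw [Subsingleton.elim (fun (a b : List Char) => a.decidableLT b)
    (@LinearOrder.toDecidableLT _ List.instLinearOrder)]

-- ===== VERDICT (by name: the statement is the Claim_ definition above) =====
theorem fct_spec : Claim_equal_fct := by
  intro N _hDom hN
  unfold Spec_fct fct fct_alt
  dsimp only
  set s := PySem.Int.toChars N with hs
  set total := s.foldl (fun acc letter => acc + (PySem.Int.ofChars? [letter]).getD 0) 0
    with htotal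
  set sm := PySem.Int.mod total 9 with hsm
  set nb := 9 - sm with hnb
  have h0 : 0 ≤ sm := PySem.Int.mod_nonneg total (by norm_num)
  have h9 : sm < 9 := PySem.Int.mod_lt total (by norm_num)
  have hnb1 : 1 ≤ nb := by omega
  have hnb9 : nb ≤ 9 := by omega
  have hnbN : nb.toNat < 10 := by omega
  set dc := Nat.digitChar nb.toNat with hdc
  have htc : PySem.Int.toChars nb = [dc] := toChars_single hnb1 hnb9
  have hdcd : dc.isDigit := digitChar_digit hnbN
  have hdcv : dval dc = nb := by
    rw [hdc, digitChar_dval hnbN]; omega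
  have hd : ∀ c ∈ s, c.isDigit := toChars_digits hN
  set i := fctLoop s s.length nb 0 with hi
  have hiL : i ≤ s.length := loop_le s nb 0 (Nat.zero_le _)
  have hmid' : ∀ k (hk : k < s.length), k < i → s[k] ≤ dc := by
    intro k hk hki
    have hkd := hd s[k] (List.getElem_mem hk)
    have := loop_mid s nb 0 k hk (Nat.zero_le _) hki
    rw [ofChars?_digit hkd] at this
    rw [digit_le_iff hkd hdcd, hdcv]
    simpa using this
  have hstop' : ∀ h : i < s.length, dc < s[i] := by
    intro h
    have hid := hd s[i] (List.getElem_mem h)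
    have := loop_stop s nb 0 h
    rw [List.getElem?_eq_getElem h] at this
    simp only [Option.bind_some] at this
    rw [ofChars?_digit hid] at this
    rw [digit_lt_iff hdcd hid, hdcv]
    simpa using this
  have hresA : PySem.List.slice s (some 0) (some (i : Int)) ++ PySem.Int.toChars nb
      ++ PySem.List.slice s (some (i : Int)) none = ins s dc i := by
    rw [PySem.List.slice_zero_start, PySem.List.slice_to_natCast,
      PySem.List.slice_from_natCast, htc]
    simp [ins]
  have hcands : (PySem.List.pyRange 0 (s.length + 1)).map
      (fun j => PySem.List.slice s none (some j) ++ PySem.Int.toChars nb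
        ++ PySem.List.slice s (some j) none)
      = (List.range (s.length + 1)).map (fun k => ins s dc k) := by
    rw [PySem.List.pyRange_one]
    have hcast : ((s.length : Int) + 1 - 0).toNat = s.length + 1 := by omega
    rw [hcast, List.map_map]
    apply List.map_congr_left
    intro k _
    simp only [Function.comp_apply, zero_add]
    rw [PySem.List.slice_to_natCast, PySem.List.slice_from_natCast, htc]
    simp [ins]
  rw [hresA, hcands]
  have hne : (List.range (s.length + 1)).map (fun k => ins s dc k) ≠ [] := by
    simp
  obtain ⟨m, hm⟩ : ∃ m, PySem.List.min?
      ((List.range (s.length + 1)).map (fun k => ins s dc k)) id = some m := by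
    rcases hmo : PySem.List.min? ((List.range (s.length + 1)).map (fun k => ins s dc k)) id with
      _ | m
    · exact absurd ((PySem.List.min?_eq_none_iff _ _).mp hmo) hne
    · exact ⟨m, rfl⟩
  have hmem := PySem.List.min?_mem hm
  obtain ⟨j, hj, rfl⟩ := List.mem_map.mp hmem
  have hjle : j ≤ s.length := by
    have := List.mem_range.mp hj
    omega
  have hmemi : ins s dc i ∈ (List.range (s.length + 1)).map (fun k => ins s dc k) :=
    List.mem_map.mpr ⟨i, List.mem_range.mpr (Nat.lt_succ_of_le hiL), rfl⟩
  have hm2 := hm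
  rw [min?_inst_eq] at hm2
  have h1 : ins s dc j ≤ ins s dc i := by
    have := PySem.List.min?_isMin hm2 (ins s dc i) hmemi
    simpa using this
  have h2 : ins s dc i ≤ ins s dc j := ins_min s dc i hiL hmid' hstop' j hjle
  have hmi : ins s dc j = ins s dc i := le_antisymm h1 h2
  rw [hm]
  simp only [Option.getD_some]
  rw [hmi]
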